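-- pv_equiv track=rewrite | github.com/nomelancholy/problem_solving | 프로그래머스/lv0/120812. 최빈값 구하기/최빈값 구하기.py | solution
-- ===== SOURCE A (Python) =====
-- from collections import defaultdict
--
-- def solution(array):
--     answer = 0
--
--     check_dict = defaultdict(int)
--
--     for number in array:
--         check_dict[number] += 1
--
--     max_count = max(check_dict.values())
--
--     answer_list = []
--
--     for key, value in check_dict.items():
--         if value == max_count:
--             answer_list.append(key)
--
--     if len(answer_list) > 1:
--         answer = -1
--     else:
--         answer = answer_list[0]
--
--     return answer
-- ===== SOURCE B (Python) =====
-- def solution(array):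
--     counts = {}
--     for x in array:
--         counts[x] = counts.get(x, 0) + 1
--     best_key, best_count, tie = 0, 0, False
--     for k, v in counts.items():
--         if v > best_count:
--             best_key, best_count, tie = k, v, False
--         elif v == best_count:
--             tie = True
--     return -1 if tie else best_key
-- ===== Notes on version B (the rewrite author's own statement) =====
-- stated objective: alternative
-- what changed: A scans the counts twice (max() then a filter loop collecting all argmax keys into a list); B makes one streaming pass over the counts keeping (best_key, best_count, tie_flag), so no answer list and no separate max pass.
import Mathlib
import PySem

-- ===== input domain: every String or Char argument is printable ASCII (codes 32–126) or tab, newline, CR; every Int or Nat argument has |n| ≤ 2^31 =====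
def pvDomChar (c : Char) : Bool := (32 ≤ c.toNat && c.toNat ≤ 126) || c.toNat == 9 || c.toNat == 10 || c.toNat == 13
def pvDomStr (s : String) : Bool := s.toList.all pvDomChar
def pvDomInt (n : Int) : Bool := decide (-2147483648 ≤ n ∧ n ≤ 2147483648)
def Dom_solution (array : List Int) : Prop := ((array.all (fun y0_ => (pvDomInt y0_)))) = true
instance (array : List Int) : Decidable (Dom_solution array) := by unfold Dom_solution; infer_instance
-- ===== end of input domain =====

-- B replaces A's three passes over the counts (max(), then a filter loop building the
-- list of all argmax keys, then a length test) by one streaming pass that keeps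
-- (best_key, best_count, tie_flag); objective: alternative single-pass decomposition.

-- ===== PORT A =====
def solution (array : List Int) : Int :=
  let check := array.foldl (fun d number => PySem.Dict.modify d number 0 (· + 1))
                 (PySem.Dict.empty : PySem.Dict Int Int)
  match PySem.List.max? (PySem.Dict.values check) (fun v => v) with
  | none => 0  -- Python's max() raises ValueError here (empty array); excluded by Pre_solution
  | some maxCount =>
    let answerList := (PySem.Dict.items check).foldl
        (fun acc kv => if kv.2 = maxCount then acc ++ [kv.1] else acc) ([] : List Int)
    if answerList.length > 1 then -1
    else (PySem.List.pyGet? answerList 0).getD 0  -- answer_list[0]; in range under Pre_solution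

-- ===== PORT B =====
-- B-side helper: the body of B's single scanning loop over counts.items()
def bstep (s : Int × Int × Bool) (kv : Int × Int) : Int × Int × Bool :=
  if kv.2 > s.2.1 then (kv.1, kv.2, false)
  else if kv.2 = s.2.1 then (s.1, s.2.1, true)
  else s

def solution_alt (array : List Int) : Int :=
  let counts := array.foldl (fun d x => PySem.Dict.insert d x (PySem.Dict.getD d x 0 + 1))
                  (PySem.Dict.empty : PySem.Dict Int Int)
  let r := (PySem.Dict.items counts).foldl bstep ((0 : Int), (0 : Int), false)
  if r.2.2 then -1 else r.1

-- ===== PRECONDITION & SPEC =====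
-- Pre_ excludes only the empty list, on which A's max() raises ValueError.
def Pre_solution (array : List Int) : Prop := array ≠ []
instance (array : List Int) : Decidable (Pre_solution array) := by unfold Pre_solution; infer_instance
def pvWitness_solution : List Int := ([1, 2, 2])

def Spec_solution (array : List Int) (out : Int) : Prop := out = solution_alt array
instance (array : List Int) (out : Int) : Decidable (Spec_solution array out) := by unfold Spec_solution; infer_instance

-- ===== CLAIM (what is proved, stated in full; the proofs are below) =====
def Claim_equal_solution : Prop := ∀ (array : List Int), Dom_solution array → Pre_solution array → Spec_solution array (solution array)

-- ===== LEMMAS AND PROOFS =====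

-- running max over the second components
def fmax (L : List (Int × Int)) (b : Int) : Int := L.foldl (fun m p => max m p.2) b

theorem fmax_le (L : List (Int × Int)) (b : Int) :
    b ≤ fmax L b ∧ ∀ p ∈ L, p.2 ≤ fmax L b := by
  induction L generalizing b with
  | nil => simp [fmax]
  | cons q L ih =>
    have h := ih (max b q.2)
    have hr : fmax (q :: L) b = fmax L (max b q.2) := rfl
    rw [hr]
    refine ⟨le_trans (le_max_left _ _) h.1, ?_⟩
    intro p hp
    rcases List.mem_cons.mp hp with hp | hp
    · rw [hp]; exact le_trans (le_max_right b q.2) h.1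
    · exact h.2 p hp

theorem fmax_of_le (L : List (Int × Int)) (b : Int) (h : ∀ p ∈ L, p.2 ≤ b) :
    fmax L b = b := by
  induction L generalizing b with
  | nil => rfl
  | cons q L ih =>
    have hq : q.2 ≤ b := h q (List.mem_cons_self)
    have : max b q.2 = b := by omega
    simpa [fmax, this] using ih b (fun p hp => h p (List.mem_cons_of_mem _ hp))

theorem fmax_attained (L : List (Int × Int)) (b : Int) :
    fmax L b = b ∨ ∃ p ∈ L, p.2 = fmax L b := by
  induction L generalizing b with
  | nil => exact Or.inl rfl
  | cons q L ih =>
    rcases ih (max b q.2) with h | ⟨p, hp, hpe⟩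
    · by_cases hq : b ≤ q.2
      · refine Or.inr ⟨q, List.mem_cons_self, ?_⟩
        simp only [fmax, List.foldl_cons] at *
        omega
      · left
        simp only [fmax, List.foldl_cons] at *
        omega
    · exact Or.inr ⟨p, List.mem_cons_of_mem _ hp, hpe⟩

-- B's loop when no value beats the accumulator
theorem bfold_noimp (L : List (Int × Int)) (bk bc : Int) (tie : Bool)
    (h : ∀ p ∈ L, p.2 ≤ bc) :
    L.foldl bstep (bk, bc, tie) = (bk, bc, tie || L.any (fun p => p.2 == bc)) := by
  induction L generalizing tie with
  | nil => simp
  | cons q L ih =>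
    have hq : q.2 ≤ bc := h q List.mem_cons_self
    have hrest : ∀ p ∈ L, p.2 ≤ bc := fun p hp => h p (List.mem_cons_of_mem _ hp)
    have hng : ¬ q.2 > bc := by omega
    rw [List.foldl_cons]
    by_cases he : q.2 = bc
    · rw [show bstep (bk, bc, tie) q = (bk, bc, true) from by simp [bstep, he],
        ih true hrest]
      simp [List.any_cons, he]
    · rw [show bstep (bk, bc, tie) q = (bk, bc, tie) from by simp [bstep, hng, he],
        ih tie hrest]
      have hb : (q.2 == bc) = false := by simpa using he
      simp [List.any_cons, hb]

-- B's loop when some value beats the accumulator: it ends at the running max,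
-- the first key attaining it, and a tie flag saying whether it is attained twice
theorem bfold_imp (L : List (Int × Int)) (bk bc : Int) (tie : Bool)
    (h : ∃ p ∈ L, bc < p.2) :
    L.foldl bstep (bk, bc, tie) =
      (((L.filter (fun p => p.2 == fmax L bc)).map Prod.fst).headD 0,
       fmax L bc,
       decide (2 ≤ (L.filter (fun p => p.2 == fmax L bc)).length)) := by
  induction L generalizing bk bc tie with
  | nil => simp at h
  | cons q L ih =>
    have hM : fmax (q :: L) bc = fmax L (max bc q.2) := rfl
    rw [List.foldl_cons]
    by_cases hq : bc < q.2
    · have hmx : max bc q.2 = q.2 := by omega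
      rw [show bstep (bk, bc, tie) q = (q.1, q.2, false) from by
        simp [bstep, gt_iff_lt, hq]]
      by_cases h2 : ∃ p ∈ L, q.2 < p.2
      · -- improvement continues in the tail
        have hMe : fmax (q :: L) bc = fmax L q.2 := by rw [hM, hmx]
        have hqlt : q.2 < fmax L q.2 := by
          obtain ⟨p, hp, hpl⟩ := h2
          exact lt_of_lt_of_le hpl ((fmax_le L q.2).2 p hp)
        have hqne : (q.2 == fmax (q :: L) bc) = false := by
          rw [hMe]; simpa using by omega
        have hqne' : (q.2 == fmax L q.2) = false := by simpa using by omega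
        rw [ih q.1 q.2 false h2, hMe, List.filter_cons]
        simp [hqne']
      · -- q is the last improvement: everything after is ≤ q.2
        push_neg at h2
        have hMv : fmax (q :: L) bc = q.2 := by
          rw [hM, hmx]; exact fmax_of_le L q.2 h2
        have hqeq : (q.2 == fmax (q :: L) bc) = true := by simp [hMv]
        rw [bfold_noimp L q.1 q.2 false h2, hMv]
        have hfil : (q :: L).filter (fun p => p.2 == q.2)
            = q :: L.filter (fun p => p.2 == q.2) := by
          rw [List.filter_cons]; simp
        rw [hfil]
        simp only [List.map_cons, List.headD_cons, List.length_cons,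
          Prod.mk.injEq, Bool.false_or]
        refine ⟨trivial, trivial, ?_⟩
        rcases ha : L.any (fun p => p.2 == q.2) with _ | _
        · have hnil : (L.filter (fun p => p.2 == q.2)) = [] := by
            rw [List.filter_eq_nil_iff]
            intro p hp
            simpa using List.any_eq_false.mp ha p hp
          simp [hnil]
        · obtain ⟨p, hp, hpe⟩ := List.any_eq_true.mp ha
          have hm : p ∈ L.filter (fun p => p.2 == q.2) := List.mem_filter.mpr ⟨hp, hpe⟩
          have h1 : 1 ≤ (L.filter (fun p => p.2 == q.2)).length :=
            List.length_pos_of_mem hm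
          symm
          simpa using by omega
    · -- q does not beat bc: the witness is in the tail
      have hw : ∃ p ∈ L, bc < p.2 := by
        obtain ⟨p, hp, hpl⟩ := h
        rcases List.mem_cons.mp hp with hp | hp
        · exact absurd (hp ▸ hpl) hq
        · exact ⟨p, hp, hpl⟩
      have hmx : max bc q.2 = bc := by omega
      have hMe : fmax (q :: L) bc = fmax L bc := by rw [hM, hmx]
      have hlt : bc < fmax L bc := by
        obtain ⟨p, hp, hpl⟩ := hw
        exact lt_of_lt_of_le hpl ((fmax_le L bc).2 p hp)
      have hqne : (q.2 == fmax (q :: L) bc) = false := by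
        rw [hMe]; simpa using by omega
      have hng : ¬ q.2 > bc := by omega
      by_cases he : q.2 = bc
      · rw [show bstep (bk, bc, tie) q = (bk, bc, true) from by simp [bstep, he],
          ih bk bc true hw, hMe, List.filter_cons]
        have hqne' : (q.2 == fmax L bc) = false := by simpa using by omega
        simp [hqne']
      · rw [show bstep (bk, bc, tie) q = (bk, bc, tie) from by simp [bstep, hng, he],
          ih bk bc tie hw, hMe, List.filter_cons]
        have hqne' : (q.2 == fmax L bc) = false := by simpa using by omega
        simp [hqne']

-- ===== VERDICT (by name: the statement is the Claim_ definition above) =====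
theorem solution_spec : Claim_equal_solution := by
  intro array _ hpre
  unfold Spec_solution
  obtain ⟨x, xs, rfl⟩ := List.exists_cons_of_ne_nil hpre
  simp only [solution, solution_alt]
  rw [← PySem.Dict.counter_eq_foldl, PySem.Dict.foldl_insert_getD_add_one_eq_counter]
  set L := (PySem.Dict.counter (x :: xs) : PySem.Dict Int Int).items with hLdef
  have hitems : L = (PySem.Set.ofList (x :: xs)).map
      (fun k => (k, (((x :: xs).count k : Int)))) := PySem.Dict.items_counter _
  have hpos : ∀ p ∈ L, 1 ≤ p.2 := by
    intro p hp
    rw [hitems] at hp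
    obtain ⟨k, hk, rfl⟩ := List.mem_map.mp hp
    have hk' : k ∈ x :: xs := (PySem.Set.mem_ofList _ _).mp hk
    have := List.count_pos_iff.mpr hk'
    simpa using this
  have hne : L ≠ [] := by
    rw [hitems, PySem.Set.ofList_cons]; simp
  obtain ⟨p0, L', hL'⟩ := List.exists_cons_of_ne_nil hne
  have hp0m : p0 ∈ L := by rw [hL']; exact List.mem_cons_self
  have himp : ∃ p ∈ L, (0 : Int) < p.2 :=
    ⟨p0, hp0m, by have := hpos p0 hp0m; omega⟩
  set M := fmax L 0 with hM
  have hMpos : 0 < M := by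
    obtain ⟨p, hp, hplt⟩ := himp
    exact lt_of_lt_of_le hplt ((fmax_le L 0).2 p hp)
  have hvals : PySem.Dict.values (PySem.Dict.counter (x :: xs)) = L.map Prod.snd := rfl
  have hmax? : PySem.List.max? (L.map Prod.snd) (fun v => v) = some M := by
    rw [hL', List.map_cons, PySem.List.max?_id_cons]
    congr 1
    have hp0 : 1 ≤ p0.2 := hpos p0 hp0m
    have h2 : max 0 p0.2 = p0.2 := by omega
    rw [hM, hL']
    show (L'.map Prod.snd).foldl max p0.2 = fmax L' (max 0 p0.2)
    rw [h2, List.foldl_map]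
    rfl
  simp only [hvals, hmax?]
  have hacond : (fun (acc : List Int) (kv : Int × Int) =>
      if kv.2 = M then acc ++ [kv.1] else acc)
      = (fun acc kv => if (fun (p : Int × Int) => p.2 == M) kv then acc ++ [kv.1] else acc) := by
    funext acc kv
    by_cases hc : kv.2 = M <;> simp [hc]
  rw [bfold_imp L 0 0 false himp]
  rw [← hM]
  rw [hacond, PySem.List.foldl_append_if, List.nil_append]
  set F := L.filter (fun p => p.2 == M) with hF
  have hFlen : 1 ≤ F.length := by
    rcases fmax_attained L 0 with h | ⟨p, hp, hpe⟩
    · rw [← hM] at h; omega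
    · rw [← hM] at hpe
      exact List.length_pos_of_mem (List.mem_filter.mpr ⟨hp, by simpa using hpe⟩)
  by_cases h2 : 2 ≤ F.length
  · rw [if_pos (by rw [List.length_map]; omega : (F.map Prod.fst).length > 1),
      if_pos (by simpa using h2)]
  · have hlen1 : F.length = 1 := by omega
    obtain ⟨p, hp⟩ := List.length_eq_one_iff.mp hlen1
    rw [hp]
    rw [if_neg (by simp), if_neg (by simp)]
    simp [PySem.List.pyGet?, PySem.List.pyIdx?]
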